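-- pv_equiv track=rewrite | github.com/SmetaninGleb/KatharaDevSecOps | Parsers/MainConfParser/parse_lab.py | generate_lab_dep
-- ===== SOURCE A (Python) =====
-- def detect_cycle_util(node, visited, rec_stack, graph):
--     visited.add(node)
--     rec_stack.add(node)
--     for neighbor in graph.get(node, []):
--         if neighbor not in visited:
--             if detect_cycle_util(neighbor, visited, rec_stack, graph):
--                 return True
--         elif neighbor in rec_stack:
--             return True
--     rec_stack.remove(node)
--     return False
--
-- def detect_cycles(graph):
--     visited = set()
--     rec_stack = set()
--     for node in graph:
--         if node not in visited:
--             if detect_cycle_util(node, visited, rec_stack, graph):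
--                 return True
--     return False
--
-- def generate_lab_dep(dependencies):
--     if detect_cycles(dependencies):
--         raise ValueError("Cycle detected in dependencies!")
--     lines = []
--     for dev, deps in dependencies.items():
--         if isinstance(deps, list) and deps:
--             dep_list = " ".join(deps)
--             lines.append(f"{dev}: {dep_list}")
--     return "\n".join(lines)
-- ===== SOURCE B (Python) =====
-- def generate_lab_dep(dependencies):
--     # Kahn-style cycle detection: repeatedly strip the nodes with no incoming
--     # edge from the still-remaining nodes; if none can be stripped while nodes
--     # remain, the remainder contains a cycle.
--     remaining = set(dependencies)
--     while remaining:
--         sources = {v for v in remaining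
--                    if not any(v in dependencies[u] for u in remaining)}
--         if not sources:
--             raise ValueError("Cycle detected in dependencies!")
--         remaining -= sources
--     return "\n".join(f"{dev}: {' '.join(deps)}"
--                      for dev, deps in dependencies.items() if deps)
-- ===== Notes on version B (the rewrite author's own statement) =====
-- stated objective: alternative
-- what changed: Cycle detection is re-done as Kahn-style source elimination (repeatedly remove nodes with no incoming edge from the remaining set; a stuck nonempty remainder means a cycle) instead of recursive DFS with a visited/rec_stack pair, and the line formatting becomes a single join over a comprehension.
import Mathlib
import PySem

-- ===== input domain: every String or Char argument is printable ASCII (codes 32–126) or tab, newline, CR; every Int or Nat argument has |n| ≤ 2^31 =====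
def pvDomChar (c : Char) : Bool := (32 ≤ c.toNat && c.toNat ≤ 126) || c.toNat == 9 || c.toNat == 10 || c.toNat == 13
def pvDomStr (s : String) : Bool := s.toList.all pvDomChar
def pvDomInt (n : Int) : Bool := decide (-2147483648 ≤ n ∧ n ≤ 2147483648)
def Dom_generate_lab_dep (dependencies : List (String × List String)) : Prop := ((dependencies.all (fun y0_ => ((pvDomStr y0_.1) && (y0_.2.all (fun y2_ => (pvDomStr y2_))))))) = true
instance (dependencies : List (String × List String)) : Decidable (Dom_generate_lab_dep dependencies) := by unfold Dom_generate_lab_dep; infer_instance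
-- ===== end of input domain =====

-- B replaces A's recursive DFS (visited/rec_stack) cycle detection by Kahn-style
-- source elimination and formats the lines with a single join over a comprehension;
-- an alternative decomposition, not claimed faster.

-- ===== PORT A =====
-- The Python argument is a dict; the association list is read into a PySem.Dict
-- (insertion order, a later duplicate key overwrites in place) by both ports.
-- graph.get(node, [])
def pvAdj (d : PySem.Dict String (List String)) (v : String) : List String :=
  PySem.Dict.getD d v []

mutual
-- detect_cycle_util(node, visited, rec_stack, graph) → (result, visited, rec_stack).
-- Python's unbounded recursion is ported with a fuel bound (fuel 0 returns False;
-- on the inputs Pre_ admits the whole detection is proved to return False, so the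
-- fuel branch is never observable there).
def pvDfsNode (d : PySem.Dict String (List String)) :
    Nat → String → PySem.Set String → PySem.Set String →
    Bool × PySem.Set String × PySem.Set String
  | 0, _, vis, st => (false, vis, st)
  | fuel+1, node, vis, st =>
    let vis1 := PySem.Set.add vis node
    let st1 := PySem.Set.add st node
    match pvDfsNbrs d fuel (pvAdj d node) vis1 st1 with
    | (true, v', s') => (true, v', s')
    | (false, v', s') => (false, v', PySem.Set.discard s' node) -- rec_stack.remove(node); node is present here
  termination_by fuel _ _ _ => (fuel, 0)
-- the 'for neighbor in graph.get(node, [])' loop with its early returns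
def pvDfsNbrs (d : PySem.Dict String (List String)) :
    Nat → List String → PySem.Set String → PySem.Set String →
    Bool × PySem.Set String × PySem.Set String
  | _, [], vis, st => (false, vis, st)
  | fuel, nb :: rest, vis, st =>
    if !(PySem.Set.contains vis nb) then
      match pvDfsNode d fuel nb vis st with
      | (true, v', s') => (true, v', s')
      | (false, v', s') => pvDfsNbrs d fuel rest v' s'
    else if PySem.Set.contains st nb then (true, vis, st)
    else pvDfsNbrs d fuel rest vis st
  termination_by fuel xs _ _ => (fuel, xs.length + 1)
end

-- detect_cycles(graph): the 'for node in graph' loop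
def pvDetectGo (d : PySem.Dict String (List String)) (fuel : Nat) :
    List String → PySem.Set String → PySem.Set String → Bool
  | [], _, _ => false
  | k :: rest, vis, st =>
    if !(PySem.Set.contains vis k) then
      match pvDfsNode d fuel k vis st with
      | (true, _, _) => true
      | (false, v', s') => pvDetectGo d fuel rest v' s'
    else pvDetectGo d fuel rest vis st

-- recursion depth never exceeds the number of nodes; any bound past that is unobservable
def pvFuel (d : PySem.Dict String (List String)) : Nat :=
  d.size + d.values.flatten.length + 1

def pvDetect (d : PySem.Dict String (List String)) : Bool :=
  pvDetectGo d (pvFuel d) d.keys PySem.Set.empty PySem.Set.empty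

def generate_lab_dep (dependencies : List (String × List String)) : String :=
  let d := PySem.Dict.ofList dependencies
  if pvDetect d then "" -- Python: raise ValueError("Cycle detected in dependencies!") — excluded by Pre_
  else
    let lines := d.items.foldl
      (fun acc p => if !p.2.isEmpty then acc ++ [p.1 ++ ": " ++ PySem.Str.join " " p.2] else acc) []
    PySem.Str.join "\n" lines

-- ===== PORT B =====
-- {v for v in remaining if not any(v in dependencies[u] for u in remaining)}
def pvSources (d : PySem.Dict String (List String)) (rem : PySem.Set String) : PySem.Set String :=
  rem.filter (fun v => !(rem.any (fun u => (PySem.Dict.getD d u []).contains v)))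

-- the while loop; it runs at most |remaining| rounds, its fuel
def pvElim (d : PySem.Dict String (List String)) : Nat → PySem.Set String → Bool
  | 0, rem => !rem.isEmpty
  | fuel+1, rem =>
    if rem.isEmpty then false
    else
      let srcs := pvSources d rem
      if srcs.isEmpty then true
      else pvElim d fuel (PySem.Set.diff rem srcs)

def generate_lab_dep_alt (dependencies : List (String × List String)) : String :=
  let d := PySem.Dict.ofList dependencies
  if pvElim d d.keys.length d.keys then "" -- Python: raise ValueError("Cycle detected in dependencies!") — excluded by Pre_
  else
    PySem.Str.join "\n"
      (d.items.filterMap (fun p =>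
        if p.2.isEmpty then none else some (p.1 ++ ": " ++ PySem.Str.join " " p.2)))

-- ===== PRECONDITION & SPEC =====
-- helpers for Pre_: bounded saturating reachable-set computation (spec-level; neither port computes it).
-- pvStepLen d S bounds the number of saturation rounds still possible, so pvClosure is the full closure.
def pvUniv (d : PySem.Dict String (List String)) : List String :=
  d.keys ++ d.values.flatten

def pvNew (d : PySem.Dict String (List String)) (S : List String) : List String :=
  ((S.flatMap (fun v => PySem.Dict.getD d v [])).filter (fun x => !S.contains x)).dedup

def pvStepLen (d : PySem.Dict String (List String)) (S : List String) : Nat :=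
  ((pvUniv d).filter (fun x => !S.contains x)).length

def pvClosureF (d : PySem.Dict String (List String)) : Nat → List String → List String
  | 0, S => S
  | fuel+1, S => if (pvNew d S).isEmpty then S else pvClosureF d fuel (S ++ pvNew d S)

def pvClosure (d : PySem.Dict String (List String)) (S : List String) : List String :=
  pvClosureF d (pvStepLen d S) S

-- Pre_ admits exactly the acyclic dependency dicts: on a dict whose edge relation
-- lets some key reach itself, the Python A raises ValueError("Cycle detected in
-- dependencies!") (and the Python B raises the same error), so those inputs are excluded.
def Pre_generate_lab_dep (dependencies : List (String × List String)) : Prop :=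
  ∀ k ∈ (PySem.Dict.ofList dependencies).keys,
    k ∉ pvClosure (PySem.Dict.ofList dependencies)
        (PySem.Set.ofList (PySem.Dict.getD (PySem.Dict.ofList dependencies) k []))
instance (dependencies : List (String × List String)) : Decidable (Pre_generate_lab_dep dependencies) := by
  unfold Pre_generate_lab_dep; infer_instance

def pvWitness_generate_lab_dep : (List (String × List String)) :=
  [("a", ["b", "c"]), ("b", ["c"]), ("c", [])]

def Spec_generate_lab_dep (dependencies : List (String × List String)) (out : String) : Prop := out = generate_lab_dep_alt dependencies
instance (dependencies : List (String × List String)) (out : String) : Decidable (Spec_generate_lab_dep dependencies out) := by unfold Spec_generate_lab_dep; infer_instance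

-- ===== CLAIM (what is proved, stated in full; the proofs are below) =====
def Claim_equal_generate_lab_dep : Prop := ∀ (dependencies : List (String × List String)), Dom_generate_lab_dep dependencies → Pre_generate_lab_dep dependencies → Spec_generate_lab_dep dependencies (generate_lab_dep dependencies)

-- ===== LEMMAS AND PROOFS =====
-- the edge relation of the dependency graph
def pvEdge (d : PySem.Dict String (List String)) (v w : String) : Prop :=
  w ∈ PySem.Dict.getD d v []

lemma pvGetD_subset_values (d : PySem.Dict String (List String)) (v x : String)
    (hx : x ∈ PySem.Dict.getD d v []) : x ∈ d.values.flatten := by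
  rcases h : PySem.Dict.get? d v with _ | l
  · rw [PySem.Dict.getD_eq_get?_getD, h] at hx
    cases hx
  · have hmem : (v, l) ∈ d.items := PySem.Dict.mem_items_of_get?_eq_some d h
    rw [PySem.Dict.getD_eq_get?_getD, h] at hx
    exact List.mem_flatten.mpr ⟨l, List.mem_map.mpr ⟨(v, l), hmem, rfl⟩, hx⟩

lemma pvFilter_length_lt {α : Type} (l : List α) (p q : α → Bool)
    (himp : ∀ x ∈ l, q x = true → p x = true) (x : α) (hx : x ∈ l)
    (hp : p x = true) (hq : q x = false) :
    (l.filter q).length < (l.filter p).length := by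
  simp only [← List.countP_eq_length_filter]
  induction l with
  | nil => cases hx
  | cons a t ih =>
    have himp' : ∀ y ∈ t, q y = true → p y = true := fun y hy => himp y (List.mem_cons_of_mem _ hy)
    rcases List.mem_cons.mp hx with rfl | hxt
    · simp [hp, hq]
      have := List.countP_mono_left himp'
      omega
    · have := ih himp' hxt
      simp only [List.countP_cons]
      by_cases hqa : q a = true
      · simp [hqa, himp a (List.mem_cons_self) hqa]; omega
      · simp only [Bool.not_eq_true] at hqa
        simp only [hqa]
        rcases Bool.eq_false_or_eq_true (p a) with h | h <;> simp [h] <;> omega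

-- properties of a member of pvNew d S: it is outside S and inside the universe
lemma pvMemNew (d : PySem.Dict String (List String)) (S : List String) (x : String)
    (hx : x ∈ pvNew d S) : x ∈ pvUniv d ∧ x ∉ S := by
  have hxf := List.mem_filter.mp (List.mem_dedup.mp hx)
  rcases List.mem_flatMap.mp hxf.1 with ⟨v, -, hxadj⟩
  exact ⟨List.mem_append_right _ (pvGetD_subset_values d v x hxadj), by simpa using hxf.2⟩

-- one saturation round strictly shrinks the number of universe elements outside S
lemma pvStepLen_lt (d : PySem.Dict String (List String)) (S : List String)
    (h : ¬ (pvNew d S).isEmpty = true) : pvStepLen d (S ++ pvNew d S) < pvStepLen d S := by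
  rcases List.exists_mem_of_ne_nil _ (by simpa using h) with ⟨x, hxnew⟩
  obtain ⟨hxuniv, hxS⟩ := pvMemNew d S x hxnew
  refine pvFilter_length_lt (pvUniv d) _ _ ?_ x hxuniv ?_ ?_
  · intro y _ hy
    simp only [Bool.not_eq_eq_eq_not, Bool.not_true, List.contains_append] at hy ⊢
    simp only [Bool.or_eq_false_iff] at hy
    exact hy.1
  · simpa using hxS
  · simp
    exact fun _ => hxnew

-- when no universe element is left outside S, a round adds nothing
lemma pvNew_empty_of_stepLen_zero (d : PySem.Dict String (List String)) (S : List String)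
    (h : pvStepLen d S = 0) : (pvNew d S).isEmpty = true := by
  by_contra hne
  rcases List.exists_mem_of_ne_nil _ (by simpa using hne) with ⟨x, hxnew⟩
  obtain ⟨hxuniv, hxS⟩ := pvMemNew d S x hxnew
  have hxf : x ∈ (pvUniv d).filter (fun x => !S.contains x) :=
    List.mem_filter.mpr ⟨hxuniv, by simpa using hxS⟩
  rw [pvStepLen, List.length_eq_zero_iff] at h
  rw [h] at hxf
  cases hxf

-- if a round adds nothing, S is closed under edges
lemma pvClosed_of_new_empty (d : PySem.Dict String (List String)) (S : List String)
    (hemp : (pvNew d S).isEmpty = true) (v w : String) (hv : v ∈ S) (hw : pvEdge d v w) :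
    w ∈ S := by
  by_contra hwS
  have : w ∈ pvNew d S :=
    List.mem_dedup.mpr (List.mem_filter.mpr ⟨List.mem_flatMap.mpr ⟨v, hv, hw⟩, by simpa using hwS⟩)
  rw [List.isEmpty_iff.mp hemp] at this
  cases this

-- pvClosure contains its seed and is closed under edges
lemma pvClosureF_sub (d : PySem.Dict String (List String)) (fuel : Nat) (S : List String) :
    S ⊆ pvClosureF d fuel S := by
  induction fuel generalizing S with
  | zero => exact fun x hx => hx
  | succ fuel ih =>
    rw [pvClosureF]
    by_cases hemp : (pvNew d S).isEmpty
    · simp only [hemp, if_true]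
      exact fun x hx => hx
    · simp only [hemp, Bool.false_eq_true, if_false]
      exact fun x hx => ih (S ++ pvNew d S) (List.mem_append_left _ hx)

lemma pvClosure_sub (d : PySem.Dict String (List String)) (S : List String) :
    S ⊆ pvClosure d S :=
  pvClosureF_sub d _ S

lemma pvClosureF_closed (d : PySem.Dict String (List String)) (fuel : Nat) (S : List String)
    (hfuel : pvStepLen d S ≤ fuel) (v w : String) (hv : v ∈ pvClosureF d fuel S)
    (hw : pvEdge d v w) : w ∈ pvClosureF d fuel S := by
  induction fuel generalizing S with
  | zero =>
    exact pvClosed_of_new_empty d S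
      (pvNew_empty_of_stepLen_zero d S (Nat.le_zero.mp hfuel)) v w hv hw
  | succ fuel ih =>
    rw [pvClosureF] at hv ⊢
    by_cases hemp : (pvNew d S).isEmpty
    · simp only [hemp, if_true] at hv ⊢
      exact pvClosed_of_new_empty d S hemp v w hv hw
    · simp only [hemp, Bool.false_eq_true, if_false] at hv ⊢
      exact ih (S ++ pvNew d S) (by have := pvStepLen_lt d S hemp; omega) hv

lemma pvClosure_closed (d : PySem.Dict String (List String)) (S : List String)
    (v w : String) (hv : v ∈ pvClosure d S) (hw : pvEdge d v w) :
    w ∈ pvClosure d S :=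
  pvClosureF_closed d _ S le_rfl v w hv hw

lemma pvClosure_star (d : PySem.Dict String (List String)) (S : List String)
    (v w : String) (h : Relation.ReflTransGen (pvEdge d) v w) (hv : v ∈ pvClosure d S) :
    w ∈ pvClosure d S := by
  induction h with
  | refl => exact hv
  | tail _ hedge ih => exact pvClosure_closed d S _ _ ih hedge

-- Pre_ rules out every self-reaching node
lemma pvAcyclic (dependencies : List (String × List String))
    (hpre : Pre_generate_lab_dep dependencies) (v : String) :
    ¬ Relation.TransGen (pvEdge (PySem.Dict.ofList dependencies)) v v := by
  intro hcyc
  rcases Relation.TransGen.head'_iff.mp hcyc with ⟨w, hvw, hwv⟩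
  have hvkey : v ∈ (PySem.Dict.ofList dependencies).keys := by
    by_contra hk
    have hc : (PySem.Dict.ofList dependencies).contains v = false := by
      rcases Bool.eq_false_or_eq_true ((PySem.Dict.ofList dependencies).contains v) with h | h
      · exact absurd ((PySem.Dict.contains_iff_mem_keys _ _).mp h) hk
      · exact h
    have hgd := PySem.Dict.getD_of_not_contains (PySem.Dict.ofList dependencies) ([] : List String) hc
    rw [pvEdge, hgd] at hvw
    cases hvw
  have hstart : w ∈ PySem.Set.ofList (PySem.Dict.getD (PySem.Dict.ofList dependencies) v []) :=
    (PySem.Set.mem_ofList _ _).mpr hvw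
  have h1 := pvClosure_sub (PySem.Dict.ofList dependencies) _ hstart
  have h2 := pvClosure_star (PySem.Dict.ofList dependencies) _ w v hwv h1
  exact hpre v hvkey h2

-- ===== DFS soundness: a True verdict exhibits a cycle, and a False call restores rec_stack =====
def pvNodeInv (d : PySem.Dict String (List String)) (fuel : Nat) : Prop :=
  ∀ (node : String) (vis st : PySem.Set String),
    vis.Nodup → st.Nodup → (∀ r ∈ st, Relation.ReflTransGen (pvEdge d) r node) →
    st ⊆ vis → node ∉ vis →
    (pvDfsNode d fuel node vis st).2.1.Nodup ∧ (pvDfsNode d fuel node vis st).2.2.Nodup ∧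
    vis ⊆ (pvDfsNode d fuel node vis st).2.1 ∧
    ((pvDfsNode d fuel node vis st).1 = false → (pvDfsNode d fuel node vis st).2.2 = st) ∧
    ((pvDfsNode d fuel node vis st).1 = true → ∃ v, Relation.TransGen (pvEdge d) v v)

def pvNbrsInv (d : PySem.Dict String (List String)) (fuel : Nat) : Prop :=
  ∀ (node : String) (nbrs : List String) (vis st : PySem.Set String),
    vis.Nodup → st.Nodup → (∀ r ∈ st, Relation.ReflTransGen (pvEdge d) r node) →
    st ⊆ vis → (∀ nb ∈ nbrs, pvEdge d node nb) →
    (pvDfsNbrs d fuel nbrs vis st).2.1.Nodup ∧ (pvDfsNbrs d fuel nbrs vis st).2.2.Nodup ∧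
    vis ⊆ (pvDfsNbrs d fuel nbrs vis st).2.1 ∧
    ((pvDfsNbrs d fuel nbrs vis st).1 = false → (pvDfsNbrs d fuel nbrs vis st).2.2 = st) ∧
    ((pvDfsNbrs d fuel nbrs vis st).1 = true → ∃ v, Relation.TransGen (pvEdge d) v v)

lemma pvNode_zero (d : PySem.Dict String (List String)) : pvNodeInv d 0 := by
  intro node vis st hv hs _ _ _
  simp only [pvDfsNode]
  refine ⟨hv, hs, fun x hx => hx, ?_, ?_⟩ <;> simp

lemma pvNbrs_of_node (d : PySem.Dict String (List String)) (fuel : Nat)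
    (h : pvNodeInv d fuel) : pvNbrsInv d fuel := by
  intro node nbrs
  induction nbrs with
  | nil =>
    intro vis st hv hs _ _ _
    simp only [pvDfsNbrs]
    refine ⟨hv, hs, fun x hx => hx, ?_, ?_⟩ <;> simp
  | cons nb rest ih =>
    intro vis st hv hs hst hsub hed
    have hednb : pvEdge d node nb := hed nb List.mem_cons_self
    have hedrest : ∀ x ∈ rest, pvEdge d node x := fun x hx => hed x (List.mem_cons_of_mem _ hx)
    rw [pvDfsNbrs]
    by_cases hvisnb : PySem.Set.contains vis nb = true
    · simp only [hvisnb, Bool.not_true, Bool.false_eq_true, if_false]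
      by_cases hstnb : PySem.Set.contains st nb = true
      · simp only [hstnb, if_true]
        have hnbst : nb ∈ st := (PySem.Set.contains_iff st nb).mp hstnb
        refine ⟨hv, hs, fun x hx => hx, ?_, ?_⟩
        · simp
        · intro _
          exact ⟨nb, Relation.TransGen.tail' (hst nb hnbst) hednb⟩

      · simp only [hstnb, Bool.false_eq_true, if_false]
        exact ih vis st hv hs hst hsub hedrest
    · have hnbvis : nb ∉ vis := fun hm => hvisnb ((PySem.Set.contains_iff vis nb).mpr hm)
      simp only [hvisnb, Bool.not_false, if_true]
      obtain ⟨hv2, hs2, hvsub, hfalse, htrue⟩ :=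
        h nb vis st hv hs (fun r hr => Relation.ReflTransGen.tail (hst r hr) hednb) hsub hnbvis
      rcases hres : pvDfsNode d fuel nb vis st with ⟨b, v2, s2⟩
      rw [hres] at hv2 hs2 hvsub hfalse htrue
      cases b with
      | true =>
        dsimp only
        refine ⟨hv2, hs2, hvsub, ?_, ?_⟩
        · simp
        · intro _; exact htrue rfl
      | false =>
        dsimp only
        have hs2st : s2 = st := hfalse rfl
        subst hs2st
        obtain ⟨hv3, hs3, hvsub3, hfalse3, htrue3⟩ :=
          ih v2 s2 hv2 hs2 hst (fun r hr => hvsub (hsub hr)) hedrest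
        exact ⟨hv3, hs3, fun x hx => hvsub3 (hvsub hx), hfalse3, htrue3⟩

lemma pvNode_succ (d : PySem.Dict String (List String)) (fuel : Nat)
    (h : pvNbrsInv d fuel) : pvNodeInv d (fuel + 1) := by
  intro node vis st hv hs hst hsub hnv
  have hnst : node ∉ st := fun hm => hnv (hsub hm)
  have hvis1 : PySem.Set.add vis node = vis ++ [node] := PySem.Set.add_of_not_mem hnv
  have hst1 : PySem.Set.add st node = st ++ [node] := PySem.Set.add_of_not_mem hnst
  have hv1 : (PySem.Set.add vis node).Nodup := PySem.Set.nodup_add _ _ hv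
  have hs1 : (PySem.Set.add st node).Nodup := PySem.Set.nodup_add _ _ hs
  have hst1inv : ∀ r ∈ PySem.Set.add st node, Relation.ReflTransGen (pvEdge d) r node := by
    intro r hr
    rcases (PySem.Set.mem_add st node r).mp hr with hr | rfl
    · exact hst r hr
    · exact Relation.ReflTransGen.refl
  have hsub1 : PySem.Set.add st node ⊆ PySem.Set.add vis node := by
    intro r hr
    rcases (PySem.Set.mem_add st node r).mp hr with hr | rfl
    · exact (PySem.Set.mem_add vis node r).mpr (Or.inl (hsub hr))
    · exact (PySem.Set.mem_add _ _ _).mpr (Or.inr rfl)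
  have hedges : ∀ nb ∈ pvAdj d node, pvEdge d node nb := fun nb hnb => hnb
  obtain ⟨hv2, hs2, hvsub, hfalse, htrue⟩ :=
    h node (pvAdj d node) (PySem.Set.add vis node) (PySem.Set.add st node) hv1 hs1 hst1inv hsub1 hedges
  rw [pvDfsNode]
  rcases hres : pvDfsNbrs d fuel (pvAdj d node) (PySem.Set.add vis node) (PySem.Set.add st node) with ⟨b, v2, s2⟩
  rw [hres] at hv2 hs2 hvsub hfalse htrue
  have hvsub' : vis ⊆ v2 := fun x hx => hvsub ((PySem.Set.mem_add vis node x).mpr (Or.inl hx))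
  cases b with
  | true =>
    dsimp only
    refine ⟨hv2, hs2, hvsub', ?_, ?_⟩
    · simp
    · intro _; exact htrue rfl
  | false =>
    dsimp only
    have hs2st : s2 = PySem.Set.add st node := hfalse rfl
    have hdisc : PySem.Set.discard s2 node = st := by
      rw [hs2st, hst1, PySem.Set.discard, List.filter_append]
      have h1 : st.filter (fun y => !y == node) = st := by
        apply List.filter_eq_self.mpr
        intro y hy
        simp only [Bool.not_eq_eq_eq_not, Bool.not_true, beq_eq_false_iff_ne, ne_eq]
        exact fun hyx => hnst (hyx ▸ hy)
      have h2 : [node].filter (fun y => !y == node) = [] := by simp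
      rw [h1, h2, List.append_nil]
    refine ⟨hv2, ?_, hvsub', ?_, ?_⟩
    · rw [hdisc]; exact hs
    · intro _; exact hdisc
    · simp

lemma pvNode_inv (d : PySem.Dict String (List String)) (fuel : Nat) : pvNodeInv d fuel := by
  induction fuel with
  | zero => exact pvNode_zero d
  | succ n ih => exact pvNode_succ d n (pvNbrs_of_node d n ih)

lemma pvDetectGo_true (d : PySem.Dict String (List String)) (fuel : Nat)
    (ks : List String) (vis : PySem.Set String) (hvis : vis.Nodup)
    (h : pvDetectGo d fuel ks vis PySem.Set.empty = true) :
    ∃ v, Relation.TransGen (pvEdge d) v v := by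
  induction ks generalizing vis with
  | nil => cases h
  | cons k rest ih =>
    rw [pvDetectGo] at h
    by_cases hk : PySem.Set.contains vis k = true
    · simp only [hk, Bool.not_true, Bool.false_eq_true, if_false] at h
      exact ih _ hvis h
    · have hknv : k ∉ vis := fun hm => hk ((PySem.Set.contains_iff vis k).mpr hm)
      simp only [hk, Bool.not_false, if_true] at h
      obtain ⟨hv2, hs2, hvsub, hfalse, htrue⟩ :=
        pvNode_inv d fuel k vis PySem.Set.empty hvis List.nodup_nil
          (fun r hr => by cases hr) (fun r hr => by cases hr) hknv
      rcases hres : pvDfsNode d fuel k vis PySem.Set.empty with ⟨b, v2, s2⟩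
      rw [hres] at hv2 hs2 hvsub hfalse htrue h
      cases b with
      | true => exact htrue rfl
      | false =>
        dsimp only at h
        have hs2e : s2 = PySem.Set.empty := hfalse rfl
        rw [hs2e] at h
        exact ih v2 hv2 h

lemma pvDetect_false (dependencies : List (String × List String))
    (hpre : Pre_generate_lab_dep dependencies) :
    pvDetect (PySem.Dict.ofList dependencies) = false := by
  rcases Bool.eq_false_or_eq_true (pvDetect (PySem.Dict.ofList dependencies)) with h | h
  · exfalso
    obtain ⟨v, hcyc⟩ := pvDetectGo_true (PySem.Dict.ofList dependencies) _ _ _ List.nodup_nil h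
    exact pvAcyclic dependencies hpre v hcyc
  · exact h

-- ===== elimination completeness: on an acyclic graph the worklist empties =====
lemma pvCyc (d : PySem.Dict String (List String)) (R : List String) (hne : R ≠ [])
    (hpred : ∀ v ∈ R, ∃ u ∈ R, pvEdge d u v) :
    ∃ v, Relation.TransGen (pvEdge d) v v := by
  classical
  let F : Nat → {x // x ∈ R} := fun n => Nat.rec (motive := fun _ => {x // x ∈ R})
    ⟨R.head hne, List.head_mem hne⟩
    (fun _ p => ⟨(hpred p.1 p.2).choose, (hpred p.1 p.2).choose_spec.1⟩) n
  have hFedge : ∀ n, pvEdge d (F (n+1)).1 (F n).1 := fun n => (hpred (F n).1 (F n).2).choose_spec.2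
  have hstar : ∀ k i, Relation.ReflTransGen (pvEdge d) (F (i+k)).1 (F i).1 := by
    intro k
    induction k with
    | zero => intro i; exact Relation.ReflTransGen.refl
    | succ k ih => intro i; exact Relation.ReflTransGen.head (hFedge (i+k)) (ih i)
  have htg : ∀ i j, i < j → Relation.TransGen (pvEdge d) (F j).1 (F i).1 := by
    intro i j hij
    obtain ⟨k, rfl⟩ : ∃ k, j = (i+k)+1 := ⟨j - i - 1, by omega⟩
    exact Relation.TransGen.head' (hFedge (i+k)) (hstar k i)
  by_cases hinj : ∀ a ∈ List.range (R.length+1), ∀ b ∈ List.range (R.length+1), (F a).1 = (F b).1 → a = b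
  · exfalso
    have hnd : ((List.range (R.length+1)).map (fun i => (F i).1)).Nodup :=
      (List.nodup_range).map_on hinj
    have hsubR : ((List.range (R.length+1)).map (fun i => (F i).1)) ⊆ R := by
      intro x hx
      rcases List.mem_map.mp hx with ⟨i, -, rfl⟩
      exact (F i).2
    have hle := (hnd.subperm hsubR).length_le
    simp at hle
  · push Not at hinj
    obtain ⟨a, -, b, -, heq, hab⟩ := hinj
    rcases Nat.lt_or_ge a b with h1 | h2
    · refine ⟨(F a).1, ?_⟩
      have := htg a b h1
      rw [← heq] at this
      exact this
    · have h3 : b < a := lt_of_le_of_ne h2 (Ne.symm hab)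
      refine ⟨(F b).1, ?_⟩
      have := htg b a h3
      rw [heq] at this
      exact this

lemma pvElim_false (dependencies : List (String × List String))
    (hpre : Pre_generate_lab_dep dependencies) (fuel : Nat) (rem : List String)
    (hlen : rem.length ≤ fuel) :
    pvElim (PySem.Dict.ofList dependencies) fuel rem = false := by
  induction fuel generalizing rem with
  | zero =>
    have h0 : rem = [] := List.eq_nil_of_length_eq_zero (Nat.le_zero.mp hlen)
    subst h0
    simp [pvElim]
  | succ fuel ih =>
    rw [pvElim]
    by_cases hre : rem.isEmpty
    · simp [hre]
    · simp only [hre, Bool.false_eq_true, if_false]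
      by_cases hsrc : (pvSources (PySem.Dict.ofList dependencies) rem).isEmpty
      · exfalso
        have hne : rem ≠ [] := fun h0 => by simp [h0] at hre
        have hpred : ∀ v ∈ rem, ∃ u ∈ rem, pvEdge (PySem.Dict.ofList dependencies) u v := by
          intro v hv
          have hf := List.filter_eq_nil_iff.mp (List.isEmpty_iff.mp hsrc) v hv
          have hf' : (rem.any fun u => ((PySem.Dict.ofList dependencies).getD u []).contains v) = true := by
            revert hf
            cases rem.any fun u => ((PySem.Dict.ofList dependencies).getD u []).contains v <;> simp
          rcases List.any_eq_true.mp hf' with ⟨u, hu, hcv⟩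
          exact ⟨u, hu, (List.contains_iff_mem).mp hcv⟩
        obtain ⟨v, hcyc⟩ := pvCyc (PySem.Dict.ofList dependencies) rem hne hpred
        exact pvAcyclic dependencies hpre v hcyc
      · simp only [hsrc, Bool.false_eq_true, if_false]
        apply ih
        have hsne : pvSources (PySem.Dict.ofList dependencies) rem ≠ [] := fun h0 => by simp [h0] at hsrc
        rcases List.exists_mem_of_ne_nil _ hsne with ⟨x, hxs⟩
        have hxr : x ∈ rem := (List.mem_filter.mp hxs).1
        have hlt : (PySem.Set.diff rem (pvSources (PySem.Dict.ofList dependencies) rem)).length < rem.length := by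
          apply List.length_filter_lt_length_iff_exists.mpr
          refine ⟨x, hxr, ?_⟩
          simpa using hxs
        omega

-- ===== formatting =====
lemma pvFormat_eq (items : List (String × List String)) :
    items.foldl (fun acc p => if !p.2.isEmpty then acc ++ [p.1 ++ ": " ++ PySem.Str.join " " p.2] else acc) [] =
    items.filterMap (fun p => if p.2.isEmpty then none else some (p.1 ++ ": " ++ PySem.Str.join " " p.2)) := by
  rw [PySem.List.foldl_append_if]
  rw [List.nil_append]
  induction items with
  | nil => rfl
  | cons p rest ih =>
    by_cases hp : p.2.isEmpty
    · have hp' : p.2 = [] := List.isEmpty_iff.mp hp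
      simp [hp', ih]
    · have hp' : p.2 ≠ [] := by simpa [List.isEmpty_iff] using hp
      simp [hp, hp', ih]

-- ===== VERDICT (by name: the statement is the Claim_ definition above) =====
theorem generate_lab_dep_spec : Claim_equal_generate_lab_dep := by
  intro deps _ hpre
  unfold Spec_generate_lab_dep generate_lab_dep generate_lab_dep_alt
  simp only [pvDetect_false deps hpre, pvElim_false deps hpre _ _ le_rfl,
    Bool.false_eq_true, if_false, pvFormat_eq]
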